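-- pv_equiv track=rewrite | github.com/MyannaHarris/List-comparing | hw1.py | generate_n_recursive_less_thans
-- ===== SOURCE A (Python) =====
-- def generate_n_recursive_less_thans(n):
--     less_thans = []
--     if n > 0:
--         j = 1
--         less_thans.append((0,j))
--         temp = list(less_thans)
--         while j < n:
--             temp2 = list(temp)
--             temp = []
--             for x,y in temp2:
--                 less_thans.append((x,y+1))
--                 less_thans.append((x+1,y+1))
--                 temp.append((x,y+1))
--                 temp.append((x+1,y+1))
--             j = j + 1
--
--     return less_thans
-- ===== SOURCE B (Python) =====
-- def generate_n_recursive_less_thans(n):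
--     # Level k (k = 1..n) of A's expansion consists of 2**(k-1) pairs whose
--     # i-th entry is (popcount(i), k): each parent (x, y) emits (x, y+1) then
--     # (x+1, y+1), so the i-th pair of a level has x = number of 1-bits of i.
--     out = []
--     k = 1
--     while k <= n:
--         out.extend((bin(i).count("1"), k) for i in range(2 ** (k - 1)))
--         k += 1
--     return out
-- ===== Notes on version B (the rewrite author's own statement) =====
-- stated objective: alternative
-- what changed: B replaces A's level-by-level expansion with maintained temp/temp2 lists by a direct closed-form enumeration: for each level k it emits (popcount(i), k) for i in 0..2**(k-1)-1.
import Mathlib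
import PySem

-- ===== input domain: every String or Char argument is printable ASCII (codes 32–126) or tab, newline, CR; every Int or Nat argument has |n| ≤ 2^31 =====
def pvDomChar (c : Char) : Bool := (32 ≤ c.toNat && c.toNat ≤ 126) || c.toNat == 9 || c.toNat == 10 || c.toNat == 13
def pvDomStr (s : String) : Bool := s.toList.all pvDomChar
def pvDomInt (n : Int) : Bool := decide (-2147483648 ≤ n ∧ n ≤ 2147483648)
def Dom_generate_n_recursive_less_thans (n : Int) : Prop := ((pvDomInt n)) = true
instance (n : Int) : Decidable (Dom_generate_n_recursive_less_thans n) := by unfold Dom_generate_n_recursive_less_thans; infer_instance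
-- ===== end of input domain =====

-- B enumerates each level k directly as (popcount i, k) for i < 2^(k-1) instead of
-- A's maintained temp/temp2 level expansion; same cost, different decomposition.

-- ===== PORT A =====
-- the while-loop body: for (x,y) in temp2 append (x,y+1),(x+1,y+1) to BOTH less_thans
-- (first state component) and the fresh temp (second state component)
def pvALoop (n j : Int) (temp less : List (Int × Int)) : List (Int × Int) :=
  if j < n then
    let st := temp.foldl
      (fun (s : List (Int × Int) × List (Int × Int)) p =>
        (s.1 ++ [(p.1, p.2 + 1), (p.1 + 1, p.2 + 1)],
         s.2 ++ [(p.1, p.2 + 1), (p.1 + 1, p.2 + 1)])) (less, [])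
    pvALoop n (j + 1) st.2 st.1
  else less
termination_by (n - j).toNat
decreasing_by omega

def generate_n_recursive_less_thans (n : Int) : List (Int × Int) :=
  if n > 0 then pvALoop n 1 [(0, 1)] [(0, 1)] else []

-- ===== PORT B =====
-- port of bin(i).count("1"): number of 1-bits of a nonnegative integer
def pvPopcount (i : Nat) : Nat :=
  if h : i = 0 then 0 else i % 2 + pvPopcount (i / 2)
termination_by i
decreasing_by exact Nat.div_lt_self (Nat.pos_of_ne_zero h) one_lt_two

-- the while-loop of Source B: extend out by level k, then k += 1
-- ((k-1).toNat is exact: the loop only runs with 1 ≤ k ≤ n)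
def pvBLoop (n k : Int) (out : List (Int × Int)) : List (Int × Int) :=
  if k ≤ n then
    pvBLoop n (k + 1)
      (out ++ (List.range (2 ^ (k - 1).toNat)).map (fun i => ((pvPopcount i : Int), k)))
  else out
termination_by (n + 1 - k).toNat
decreasing_by omega

def generate_n_recursive_less_thans_alt (n : Int) : List (Int × Int) :=
  pvBLoop n 1 []

-- ===== PRECONDITION & SPEC =====
def Spec_generate_n_recursive_less_thans (n : Int) (out : List (Int × Int)) : Prop := out = generate_n_recursive_less_thans_alt n
instance (n : Int) (out : List (Int × Int)) : Decidable (Spec_generate_n_recursive_less_thans n out) := by unfold Spec_generate_n_recursive_less_thans; infer_instance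

-- ===== CLAIM (what is proved, stated in full; the proofs are below) =====
def Claim_equal_generate_n_recursive_less_thans : Prop := ∀ (n : Int), Dom_generate_n_recursive_less_thans n → Spec_generate_n_recursive_less_thans n (generate_n_recursive_less_thans n)

-- ===== LEMMAS AND PROOFS =====

-- the per-pair expansion done by A's inner for-loop
def pvF (p : Int × Int) : List (Int × Int) := [(p.1, p.2 + 1), (p.1 + 1, p.2 + 1)]

-- level m (0-based): the 2^m pairs (popcount i, m+1)
def pvLvl (m : Nat) : List (Int × Int) :=
  (List.range (2 ^ m)).map (fun i => ((pvPopcount i : Int), ((m : Int) + 1)))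

theorem pvPopcount_two_mul (i : Nat) : pvPopcount (2 * i) = pvPopcount i := by
  rcases Nat.eq_zero_or_pos i with h | h
  · simp [h]
  · rw [pvPopcount]
    have hne : ¬ (2 * i = 0) := by omega
    simp [hne, Nat.mul_div_cancel_left i (by norm_num : 0 < 2), Nat.mul_mod_right]

theorem pvPopcount_two_mul_add_one (i : Nat) :
    pvPopcount (2 * i + 1) = pvPopcount i + 1 := by
  rw [pvPopcount]
  have h2 : (2 * i + 1) / 2 = i := by omega
  have h3 : (2 * i + 1) % 2 = 1 := by omega
  simp [h2, h3]
  omega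

theorem pvRange_two_mul_map {α : Type} (N : Nat) (g : Nat → α) :
    (List.range (2 * N)).map g
      = (List.range N).flatMap (fun i => [g (2 * i), g (2 * i + 1)]) := by
  induction N with
  | zero => simp
  | succ N ih =>
    have h : 2 * (N + 1) = (2 * N + 1) + 1 := by ring
    rw [h, List.range_succ, List.range_succ, List.range_succ]
    simp [ih]

theorem pvLvl_step (m : Nat) : (pvLvl m).flatMap pvF = pvLvl (m + 1) := by
  unfold pvLvl
  rw [List.flatMap_map]
  rw [show (2 : Nat) ^ (m + 1) = 2 * 2 ^ m by ring]
  rw [pvRange_two_mul_map]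
  apply List.flatMap_congr
  intro i _
  simp [pvF, pvPopcount_two_mul, pvPopcount_two_mul_add_one]

-- A's inner fold appends the flatMap of temp2 to both state components
theorem pvFold_eq (temp : List (Int × Int)) :
    ∀ less t0, temp.foldl
      (fun (s : List (Int × Int) × List (Int × Int)) p =>
        (s.1 ++ [(p.1, p.2 + 1), (p.1 + 1, p.2 + 1)],
         s.2 ++ [(p.1, p.2 + 1), (p.1 + 1, p.2 + 1)])) (less, t0)
      = (less ++ temp.flatMap pvF, t0 ++ temp.flatMap pvF) := by
  induction temp with
  | nil => simp
  | cons p tl ih => intro less t0; simp [List.foldl_cons, ih, pvF]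

-- the list Source B emits at counter value k (k ≥ 1) is level (k-1)
theorem pvEmit_eq (k : Int) (hk : 1 ≤ k) :
    (List.range (2 ^ (k - 1).toNat)).map (fun i => ((pvPopcount i : Int), k))
      = pvLvl (k - 1).toNat := by
  unfold pvLvl
  apply List.map_congr_left
  intro i _
  simp
  omega

-- main invariant: A at state (j, temp = level (j-1), less) continues exactly as
-- Source B's loop at counter j+1 with accumulator less
theorem pvLoop_eq (n : Int) : ∀ (j : Int) (less : List (Int × Int)), 1 ≤ j →
    pvALoop n j (pvLvl (j - 1).toNat) less = pvBLoop n (j + 1) less := by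
  intro j
  induction h : (n - j).toNat using Nat.strong_induction_on generalizing j with
  | _ fuel ih =>
    intro less hj
    rw [pvALoop, pvBLoop]
    by_cases hlt : j < n
    · have h1 : j + 1 ≤ n := by omega
      simp only [hlt, if_pos, if_pos h1]
      rw [pvFold_eq]
      simp only [List.nil_append]
      rw [pvLvl_step]
      have h2 : ((j - 1).toNat + 1) = (j + 1 - 1).toNat := by omega
      rw [h2]
      have h3 : ∀ (l : List (Int×Int)), pvALoop n (j+1) (pvLvl (j+1-1).toNat) l = pvBLoop n (j+1+1) l := by
        intro l
        exact ih ((n - (j+1)).toNat) (by omega) (j+1) rfl l (by omega)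
      rw [h3, ← pvEmit_eq (j + 1) (by omega)]
    · have h1 : ¬ (j + 1 ≤ n) := by omega
      simp [hlt, h1]

theorem pvB_unroll_one (n : Int) (hn : 0 < n) :
    pvBLoop n 1 [] = pvBLoop n 2 [(0, 1)] := by
  rw [pvBLoop]
  simp only [if_pos (by omega : (1:Int) ≤ n)]
  norm_num
  have : pvPopcount 0 = 0 := by rw [pvPopcount]; simp
  simp [this]

-- ===== VERDICT (by name: the statement is the Claim_ definition above) =====
theorem generate_n_recursive_less_thans_spec : Claim_equal_generate_n_recursive_less_thans := by
  intro n _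
  unfold Spec_generate_n_recursive_less_thans generate_n_recursive_less_thans generate_n_recursive_less_thans_alt
  by_cases hn : n > 0
  · simp only [if_pos hn]
    rw [pvB_unroll_one n hn]
    have h0 : pvLvl ((1 : Int) - 1).toNat = [(0, 1)] := by
      unfold pvLvl
      norm_num
      rw [pvPopcount]; simp
    have h := pvLoop_eq n 1 [(0,1)] (by omega)
    rw [h0] at h
    exact h
  · simp only [if_neg hn]
    rw [pvBLoop]
    simp only [if_neg (by omega : ¬ (1:Int) ≤ n)]
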